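-- pv_equiv track=rewrite | github.com/akdlxm39/Baekjoon-algorithm | 백준/Gold/2636. 치즈/치즈.py | bfs
-- ===== SOURCE A (Python) =====
-- from collections import deque
--
-- dir = [(0, 1), (1, 0), (0, -1), (-1, 0)]
--
-- def bfs(n, m, cheese):
--     queue = deque([(0, 0, 0)])
--     visited = [[-1] * m for _ in range(n)]
--     visited[0][0] = 0
--     ans_time = 0
--     ans = 0
--     while queue:
--         time, cx, cy = queue.popleft()
--         for dx, dy in dir:
--             nx, ny = cx + dx, cy + dy
--             if not (0 <= nx < n and 0 <= ny < m) or visited[nx][ny] != -1: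
--                 continue
--             if cheese[nx][ny] == 1:
--                 visited[nx][ny] = time + 1
--                 queue.append((time + 1, nx, ny))
--                 if ans_time < time + 1:
--                     ans_time = time + 1
--                     ans = 1
--                 elif ans_time == time + 1:
--                     ans += 1
--
--             else:
--                 visited[nx][ny] = time
--                 queue.appendleft((time, nx, ny))
--     return ans_time, ans
-- ===== SOURCE B (Python) =====
-- from collections import deque
--
-- DIRS = [(0, 1), (1, 0), (0, -1), (-1, 0)]
--
-- def bfs(n, m, cheese):
--     # round-by-round melt simulation: flood the exposed region, collect the
--     # next layer of melting cheese; answer = (index, size) of last non-empty layer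
--     visited = [[False] * m for _ in range(n)]
--     visited[0][0] = True
--     work = deque([(0, 0)])
--     t = 0
--     ans_time, ans = 0, 0
--     while True:
--         nxt = []
--         while work:
--             cx, cy = work.popleft()
--             for dx, dy in DIRS:
--                 nx, ny = cx + dx, cy + dy
--                 if 0 <= nx < n and 0 <= ny < m and not visited[nx][ny]:
--                     visited[nx][ny] = True
--                     if cheese[nx][ny] == 1:
--                         nxt.append((nx, ny))
--                     else:
--                         work.appendleft((nx, ny))
--         if not nxt:
--             return ans_time, ans
--         t += 1
--         ans_time, ans = t, len(nxt)
--         work = deque(nxt)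
-- ===== Notes on version B (the rewrite author's own statement) =====
-- stated objective: alternative
-- what changed: A runs a single 0-1-BFS with a deque whose every entry carries its melt time and maintains the answer by a running max/count; B simulates melting round by round: each round floods the currently exposed region into a plain work stack, collects the next layer of melting cheese in a separate list, and the answer is simply the index and size of the last non-empty layer.
import Mathlib
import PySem

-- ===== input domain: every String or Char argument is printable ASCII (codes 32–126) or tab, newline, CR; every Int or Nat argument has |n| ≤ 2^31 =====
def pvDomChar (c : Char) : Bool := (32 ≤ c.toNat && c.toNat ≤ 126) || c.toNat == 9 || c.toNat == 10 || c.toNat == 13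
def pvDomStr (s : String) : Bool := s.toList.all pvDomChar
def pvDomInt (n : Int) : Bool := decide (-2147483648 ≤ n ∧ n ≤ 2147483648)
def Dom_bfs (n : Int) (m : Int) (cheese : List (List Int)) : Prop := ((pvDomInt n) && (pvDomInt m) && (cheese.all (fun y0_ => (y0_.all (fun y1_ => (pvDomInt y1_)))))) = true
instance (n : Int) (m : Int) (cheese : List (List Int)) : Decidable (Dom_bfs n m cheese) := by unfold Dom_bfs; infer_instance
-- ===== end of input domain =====

-- B replaces A's single 0-1-BFS deque (every entry tagged with its melt time, answer maintained
-- by a running max/count) with a round-by-round melt simulation: each round floods the exposed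
-- region and collects the next layer of melting cheese; the answer is the index and size of the
-- last non-empty layer.  Objective: alternative decomposition (same O(n·m) cost).

-- ===== PORT A =====
-- shared small helpers (2D list access; defaults are never hit on in-shape states)
def pvDirs : List (Int × Int) := [(0,1),(1,0),(0,-1),(-1,0)]

def pvGetI (g : List (List Int)) (x y : Int) : Int :=
  (g.getD x.toNat []).getD y.toNat 0

def pvGetB (g : List (List Bool)) (x y : Int) : Bool :=
  (g.getD x.toNat []).getD y.toNat true

def pvSet {α : Type} (g : List (List α)) (x y : Int) (a : α) : List (List α) :=
  g.set x.toNat ((g.getD x.toNat []).set y.toNat a)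

-- count of unvisited cells (termination measures)
def pvCN : List (List Int) → Nat
  | [] => 0
  | r :: t => r.count (-1) + pvCN t

def pvCF : List (List Bool) → Nat
  | [] => 0
  | r :: t => r.count false + pvCF t

-- one neighbour check of A's inner `for dx, dy in dir` loop (state: queue, visited, ans_time, ans)
def pvStepA (n m : Int) (cheese : List (List Int)) (t : Nat) (cx cy : Int)
    (st : List (Nat × Int × Int) × List (List Int) × Int × Int) (d : Int × Int) :
    List (Nat × Int × Int) × List (List Int) × Int × Int :=
  match st with
  | (q, v, at_, a) =>
    let nx := cx + d.1
    let ny := cy + d.2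
    if ¬(0 ≤ nx ∧ nx < n ∧ 0 ≤ ny ∧ ny < m) ∨ pvGetI v nx ny ≠ -1 then (q, v, at_, a)
    else if pvGetI cheese nx ny = 1 then
      let v' := pvSet v nx ny ((t : Int) + 1)
      let q' := q ++ [(t + 1, nx, ny)]
      if at_ < (t : Int) + 1 then (q', v', (t : Int) + 1, 1)
      else if at_ = (t : Int) + 1 then (q', v', at_, a + 1)
      else (q', v', at_, a)
    else ((t, nx, ny) :: q, pvSet v nx ny (t : Int), at_, a)

-- A's `while queue` loop (the Nat fuel is only a totality guard: it exceeds the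
-- iteration bound 2*pvCN v + |queue|, which shrinks every iteration, so it never runs out)
def pvLoopA (n m : Int) (cheese : List (List Int)) :
    Nat → List (Nat × Int × Int) → List (List Int) → Int → Int → Int × Int
  | 0, _, _, at_, a => (at_, a)
  | _ + 1, [], _, at_, a => (at_, a)
  | fuel + 1, (t, cx, cy) :: rest, v, at_, a =>
    pvLoopA n m cheese fuel
      (pvDirs.foldl (pvStepA n m cheese t cx cy) (rest, v, at_, a)).1
      (pvDirs.foldl (pvStepA n m cheese t cx cy) (rest, v, at_, a)).2.1
      (pvDirs.foldl (pvStepA n m cheese t cx cy) (rest, v, at_, a)).2.2.1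
      (pvDirs.foldl (pvStepA n m cheese t cx cy) (rest, v, at_, a)).2.2.2

def bfs (n : Int) (m : Int) (cheese : List (List Int)) : Int × Int :=
  let v1 := pvSet (List.replicate n.toNat (List.replicate m.toNat (-1 : Int))) 0 0 0
  pvLoopA n m cheese (2 * pvCN v1 + 2) [(0, 0, 0)] v1 0 0

-- ===== PORT B =====
-- one neighbour check of B's flood (state: work, nxt, visited)
def pvStepB (n m : Int) (cheese : List (List Int)) (cx cy : Int)
    (st : List (Int × Int) × List (Int × Int) × List (List Bool)) (d : Int × Int) :
    List (Int × Int) × List (Int × Int) × List (List Bool) :=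
  match st with
  | (w, nxt, v) =>
    let nx := cx + d.1
    let ny := cy + d.2
    if 0 ≤ nx ∧ nx < n ∧ 0 ≤ ny ∧ ny < m ∧ pvGetB v nx ny = false then
      if pvGetI cheese nx ny = 1 then (w, nxt ++ [(nx, ny)], pvSet v nx ny true)
      else ((nx, ny) :: w, nxt, pvSet v nx ny true)
    else (w, nxt, v)

-- B's inner `while work` flood (fuel: totality guard, > the bound 2*pvCF v + |work|)
def pvFloodB (n m : Int) (cheese : List (List Int)) :
    Nat → List (Int × Int) → List (Int × Int) → List (List Bool) →
    List (Int × Int) × List (List Bool)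
  | 0, _, nxt, v => (nxt, v)
  | _ + 1, [], nxt, v => (nxt, v)
  | fuel + 1, (cx, cy) :: w, nxt, v =>
    pvFloodB n m cheese fuel
      (pvDirs.foldl (pvStepB n m cheese cx cy) (w, nxt, v)).1
      (pvDirs.foldl (pvStepB n m cheese cx cy) (w, nxt, v)).2.1
      (pvDirs.foldl (pvStepB n m cheese cx cy) (w, nxt, v)).2.2

-- B's outer `while True` loop (fuel: totality guard, > the number of melt rounds,
-- which is at most the number of unvisited cells)
def pvLoopB (n m : Int) (cheese : List (List Int)) :
    Nat → List (Int × Int) → List (List Bool) → Int → Int → Int → Int × Int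
  | 0, _, _, _, at_, a => (at_, a)
  | fuel + 1, work, v, t, at_, a =>
    let p := pvFloodB n m cheese (2 * pvCF v + work.length + 1) work [] v
    if p.1 = [] then (at_, a)
    else pvLoopB n m cheese fuel p.1 p.2 (t + 1) (t + 1) (p.1.length : Int)

def bfs_alt (n : Int) (m : Int) (cheese : List (List Int)) : Int × Int :=
  let v1 := pvSet (List.replicate n.toNat (List.replicate m.toNat false)) 0 0 true
  pvLoopB n m cheese (pvCF v1 + 2) [(0, 0)] v1 0 0 0

-- ===== PRECONDITION & SPEC =====
-- Exactly the inputs on which Python A returns (otherwise it raises IndexError building/indexing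
-- the n×m visited grid or reading cheese): n,m ≥ 1 and every cell (x,y) of the n×m rectangle
-- other than (0,0) — the only cells A ever reads — exists in cheese.
def Pre_bfs (n : Int) (m : Int) (cheese : List (List Int)) : Prop :=
  1 ≤ n ∧ 1 ≤ m ∧
    ∀ x < n.toNat, ∀ y < m.toNat, ¬(x = 0 ∧ y = 0) → y < (cheese.getD x []).length

instance (n : Int) (m : Int) (cheese : List (List Int)) : Decidable (Pre_bfs n m cheese) := by
  unfold Pre_bfs; infer_instance

def pvWitness_bfs : Int × Int × List (List Int) := (2, 2, [[0, 1], [1, 1]])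

def Spec_bfs (n : Int) (m : Int) (cheese : List (List Int)) (out : Int × Int) : Prop := out = bfs_alt n m cheese
instance (n : Int) (m : Int) (cheese : List (List Int)) (out : Int × Int) : Decidable (Spec_bfs n m cheese out) := by unfold Spec_bfs; infer_instance

-- ===== CLAIM (what is proved, stated in full; the proofs are below) =====
def Claim_equal_bfs : Prop := ∀ (n : Int) (m : Int) (cheese : List (List Int)), Dom_bfs n m cheese → Pre_bfs n m cheese → Spec_bfs n m cheese (bfs n m cheese)

-- ===== LEMMAS AND PROOFS =====

lemma pvCount_set_row (r : List Int) (j : Nat) (c : Int) (h : r.getD j 0 = -1) (hc : c ≠ -1) :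
    (r.set j c).count (-1) + 1 = r.count (-1) := by
  induction r generalizing j with
  | nil => simp at h
  | cons a l ih =>
    cases j with
    | zero =>
      simp only [List.getD_cons_zero] at h
      subst h
      simp only [List.set_cons_zero, List.count_cons]
      simp [hc]
    | succ j =>
      simp only [List.getD_cons_succ] at h
      have := ih j h
      simp only [List.set_cons_succ, List.count_cons]
      by_cases ha : a = -1 <;> simp [ha] <;> omega

lemma pvCN_set (v : List (List Int)) (i j : Nat) (c : Int)
    (h : (v.getD i []).getD j 0 = -1) (hc : c ≠ -1) :
    pvCN (v.set i ((v.getD i []).set j c)) + 1 = pvCN v := by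
  induction v generalizing i with
  | nil => simp at h
  | cons r t ih =>
    cases i with
    | zero =>
      simp only [List.getD_cons_zero] at h ⊢
      simp only [List.set_cons_zero, pvCN]
      have := pvCount_set_row r j c h hc
      omega
    | succ i =>
      simp only [List.getD_cons_succ] at h ⊢
      have := ih i h
      simp only [List.set_cons_succ, pvCN]
      omega

lemma pvStepA_le (n m : Int) (cheese : List (List Int)) (t : Nat) (cx cy : Int)
    (st : List (Nat × Int × Int) × List (List Int) × Int × Int) (d : Int × Int) :
    2 * pvCN (pvStepA n m cheese t cx cy st d).2.1 + (pvStepA n m cheese t cx cy st d).1.length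
      ≤ 2 * pvCN st.2.1 + st.1.length := by
  obtain ⟨q, v, at_, a⟩ := st
  unfold pvStepA
  dsimp only
  by_cases hg : ¬(0 ≤ cx + d.1 ∧ cx + d.1 < n ∧ 0 ≤ cy + d.2 ∧ cy + d.2 < m) ∨
      pvGetI v (cx + d.1) (cy + d.2) ≠ -1
  · rw [if_pos hg]
  · rw [if_neg hg]
    have hv : pvGetI v (cx + d.1) (cy + d.2) = -1 := not_not.mp (not_or.mp hg).2
    have hs1 : pvCN (pvSet v (cx + d.1) (cy + d.2) ((t : Int) + 1)) + 1 = pvCN v :=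
      pvCN_set _ _ _ _ hv (by omega)
    have hs2 : pvCN (pvSet v (cx + d.1) (cy + d.2) (t : Int)) + 1 = pvCN v :=
      pvCN_set _ _ _ _ hv (by omega)
    by_cases hch : pvGetI cheese (cx + d.1) (cy + d.2) = 1
    · rw [if_pos hch]
      split_ifs <;> simp <;> omega
    · rw [if_neg hch]
      simp
      omega

lemma pvFoldA_le (n m : Int) (cheese : List (List Int)) (t : Nat) (cx cy : Int)
    (ds : List (Int × Int)) :
    ∀ st, 2 * pvCN (ds.foldl (pvStepA n m cheese t cx cy) st).2.1
        + (ds.foldl (pvStepA n m cheese t cx cy) st).1.length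
      ≤ 2 * pvCN st.2.1 + st.1.length := by
  induction ds with
  | nil => intro st; simp
  | cons d ds ih =>
    intro st
    calc _ ≤ 2 * pvCN (pvStepA n m cheese t cx cy st d).2.1
            + (pvStepA n m cheese t cx cy st d).1.length := ih _
      _ ≤ _ := pvStepA_le n m cheese t cx cy st d

lemma pvCountF_set_row (r : List Bool) (j : Nat) (h : r.getD j true = false) :
    (r.set j true).count false + 1 = r.count false := by
  induction r generalizing j with
  | nil => simp at h
  | cons a l ih =>
    cases j with
    | zero =>
      simp only [List.getD_cons_zero] at h
      subst h
      simp [List.set_cons_zero]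
    | succ j =>
      simp only [List.getD_cons_succ] at h
      have := ih j h
      simp only [List.set_cons_succ, List.count_cons]
      by_cases ha : a = false <;> simp [ha] <;> omega

lemma pvCF_set (v : List (List Bool)) (i j : Nat)
    (h : (v.getD i []).getD j true = false) :
    pvCF (v.set i ((v.getD i []).set j true)) + 1 = pvCF v := by
  induction v generalizing i with
  | nil => simp at h
  | cons r t ih =>
    cases i with
    | zero =>
      simp only [List.getD_cons_zero] at h ⊢
      simp only [List.set_cons_zero, pvCF]
      have := pvCountF_set_row r j h
      omega
    | succ i =>
      simp only [List.getD_cons_succ] at h ⊢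
      have := ih i h
      simp only [List.set_cons_succ, pvCF]
      omega

lemma pvStepB_le (n m : Int) (cheese : List (List Int)) (cx cy : Int)
    (st : List (Int × Int) × List (Int × Int) × List (List Bool)) (d : Int × Int) :
    2 * pvCF (pvStepB n m cheese cx cy st d).2.2 + (pvStepB n m cheese cx cy st d).1.length
        ≤ 2 * pvCF st.2.2 + st.1.length
    ∧ (pvStepB n m cheese cx cy st d).2.1.length + pvCF (pvStepB n m cheese cx cy st d).2.2
        ≤ st.2.1.length + pvCF st.2.2 := by
  obtain ⟨w, nxt, v⟩ := st
  unfold pvStepB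
  dsimp only
  by_cases hg : 0 ≤ cx + d.1 ∧ cx + d.1 < n ∧ 0 ≤ cy + d.2 ∧ cy + d.2 < m ∧
      pvGetB v (cx + d.1) (cy + d.2) = false
  · rw [if_pos hg]
    have hset : pvCF (pvSet v (cx + d.1) (cy + d.2) true) + 1 = pvCF v := by
      unfold pvSet
      exact pvCF_set _ _ _ hg.2.2.2.2
    split_ifs <;> constructor <;> simp <;> omega
  · rw [if_neg hg]
    exact ⟨le_refl _, le_refl _⟩

lemma pvFoldB_le (n m : Int) (cheese : List (List Int)) (cx cy : Int)
    (ds : List (Int × Int)) :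
    ∀ st, (2 * pvCF (ds.foldl (pvStepB n m cheese cx cy) st).2.2
            + (ds.foldl (pvStepB n m cheese cx cy) st).1.length
          ≤ 2 * pvCF st.2.2 + st.1.length)
        ∧ ((ds.foldl (pvStepB n m cheese cx cy) st).2.1.length
            + pvCF (ds.foldl (pvStepB n m cheese cx cy) st).2.2
          ≤ st.2.1.length + pvCF st.2.2) := by
  induction ds with
  | nil => intro st; simp
  | cons d ds ih =>
    intro st
    have h1 := pvStepB_le n m cheese cx cy st d
    have h2 := ih (pvStepB n m cheese cx cy st d)
    exact ⟨le_trans h2.1 h1.1, le_trans h2.2 h1.2⟩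


-- relating B's Bool grid to A's time grid: a cell is marked iff its time is ≠ -1
def pvF (c : Int) : Bool := if c = -1 then false else true

def pvMask (g : List (List Int)) : List (List Bool) := g.map (fun r => r.map pvF)

-- A's queue entries of one layer, from B's coordinate list
def pvWmap (r : Nat) (w : List (Int × Int)) : List (Nat × Int × Int) :=
  w.map (fun p => (r, p.1, p.2))

-- A's running (ans_time, ans) as a function of B's partial next-layer list
def pvAtOf (r : Nat) (q : List (Int × Int)) (s : Int) : Int :=
  if q = [] then s else (r : Int) + 1

def pvAOf (q : List (Int × Int)) (s : Int) : Int :=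
  if q = [] then s else (q.length : Int)

-- B's outer loop, one flood already performed (fB = remaining outer fuel)
def pvContB (n m : Int) (cheese : List (List Int)) (fB : Nat)
    (p : List (Int × Int) × List (List Bool)) (t at_ a : Int) : Int × Int :=
  if p.1 = [] then (at_, a)
  else pvLoopB n m cheese fB p.1 p.2 (t + 1) (t + 1) (p.1.length : Int)

lemma pvLoopB_succ (n m : Int) (cheese : List (List Int)) (fB : Nat)
    (work : List (Int × Int)) (v : List (List Bool)) (t at_ a : Int) :
    pvLoopB n m cheese (fB + 1) work v t at_ a
      = pvContB n m cheese fB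
          (pvFloodB n m cheese (2 * pvCF v + work.length + 1) work [] v) t at_ a := rfl

lemma pvMap_set {α β : Type} (f : α → β) (l : List α) (i : Nat) (a : α) :
    (l.set i a).map f = (l.map f).set i (f a) := by
  induction l generalizing i with
  | nil => simp
  | cons x xs ih =>
    cases i with
    | zero => simp
    | succ i => simp [ih]

lemma pvMask_getD (v : List (List Int)) (i : Nat) :
    (pvMask v).getD i [] = (v.getD i []).map pvF := by
  induction v generalizing i with
  | nil => simp [pvMask]
  | cons r t ih =>
    cases i with
    | zero => simp [pvMask]
    | succ i =>
      simp only [pvMask, List.map_cons, List.getD_cons_succ]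
      exact ih i

lemma pvRow_getD (r : List Int) (j : Nat) :
    (r.map pvF).getD j true = pvF (r.getD j 0) := by
  induction r generalizing j with
  | nil => simp [pvF]
  | cons a l ih =>
    cases j with
    | zero => simp
    | succ j =>
      simp only [List.map_cons, List.getD_cons_succ]
      exact ih j

lemma pvMask_get (v : List (List Int)) (x y : Int) :
    pvGetB (pvMask v) x y = pvF (pvGetI v x y) := by
  unfold pvGetB pvGetI
  rw [pvMask_getD, pvRow_getD]

lemma pvMask_set (v : List (List Int)) (x y : Int) (c : Int) (hc : pvF c = true) :
    pvMask (pvSet v x y c) = pvSet (pvMask v) x y true := by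
  unfold pvSet
  rw [pvMask_getD]
  show (v.set x.toNat ((v.getD x.toNat []).set y.toNat c)).map (fun r => r.map pvF) = _
  rw [pvMap_set, pvMap_set, hc]
  rfl

-- one neighbour check: A's step and B's step stay related
lemma pvStepAB (n m : Int) (cheese : List (List Int)) (r : Nat) (sAt sAns : Int)
    (hs : sAt ≤ (r : Int)) (cx cy : Int) (d : Int × Int) (w q : List (Int × Int))
    (vA : List (List Int)) :
    ∃ w' q' vA',
      pvStepA n m cheese r cx cy
          (pvWmap r w ++ pvWmap (r + 1) q, vA, pvAtOf r q sAt, pvAOf q sAns) d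
        = (pvWmap r w' ++ pvWmap (r + 1) q', vA', pvAtOf r q' sAt, pvAOf q' sAns)
      ∧ pvStepB n m cheese cx cy (w, q, pvMask vA) d = (w', q', pvMask vA')
      ∧ ∃ qd, q' = q ++ qd := by
  unfold pvStepA pvStepB
  dsimp only
  by_cases hin : 0 ≤ cx + d.1 ∧ cx + d.1 < n ∧ 0 ≤ cy + d.2 ∧ cy + d.2 < m
  · by_cases hv : pvGetI vA (cx + d.1) (cy + d.2) = -1
    · have hgA : ¬(¬(0 ≤ cx + d.1 ∧ cx + d.1 < n ∧ 0 ≤ cy + d.2 ∧ cy + d.2 < m) ∨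
          pvGetI vA (cx + d.1) (cy + d.2) ≠ -1) := by
        rw [not_or]
        exact ⟨not_not.mpr hin, not_not.mpr hv⟩
      have hgB : 0 ≤ cx + d.1 ∧ cx + d.1 < n ∧ 0 ≤ cy + d.2 ∧ cy + d.2 < m ∧
          pvGetB (pvMask vA) (cx + d.1) (cy + d.2) = false :=
        ⟨hin.1, hin.2.1, hin.2.2.1, hin.2.2.2, by rw [pvMask_get, hv]; rfl⟩
      rw [if_neg hgA, if_pos hgB]
      by_cases hch : pvGetI cheese (cx + d.1) (cy + d.2) = 1
      · rw [if_pos hch, if_pos hch]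
        refine ⟨w, q ++ [(cx + d.1, cy + d.2)],
          pvSet vA (cx + d.1) (cy + d.2) ((r : Int) + 1), ?_, ?_, ?_⟩
        · cases q with
          | nil =>
            rw [if_pos (show pvAtOf r [] sAt < (r : Int) + 1 by
              simp only [pvAtOf, if_true]; omega)]
            simp [pvWmap, pvAtOf, pvAOf]
          | cons z zs =>
            rw [if_neg (show ¬ pvAtOf r (z :: zs) sAt < (r : Int) + 1 by
                simp [pvAtOf]),
              if_pos (show pvAtOf r (z :: zs) sAt = (r : Int) + 1 by simp [pvAtOf])]
            simp [pvWmap, pvAtOf, pvAOf]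
        · rw [pvMask_set _ _ _ _ (show pvF ((r : Int) + 1) = true by
            simp only [pvF, if_neg (show ¬((r : Int) + 1 = -1) by omega)])]
        · exact ⟨[(cx + d.1, cy + d.2)], rfl⟩
      · rw [if_neg hch, if_neg hch]
        refine ⟨(cx + d.1, cy + d.2) :: w, q,
          pvSet vA (cx + d.1) (cy + d.2) (r : Int), ?_, ?_, ?_⟩
        · simp [pvWmap]
        · rw [pvMask_set _ _ _ _ (show pvF (r : Int) = true by
            simp only [pvF, if_neg (show ¬((r : Int) = -1) by omega)])]
        · exact ⟨[], by simp⟩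
    · have hgA : (¬(0 ≤ cx + d.1 ∧ cx + d.1 < n ∧ 0 ≤ cy + d.2 ∧ cy + d.2 < m) ∨
          pvGetI vA (cx + d.1) (cy + d.2) ≠ -1) := Or.inr hv
      have hgB : ¬(0 ≤ cx + d.1 ∧ cx + d.1 < n ∧ 0 ≤ cy + d.2 ∧ cy + d.2 < m ∧
          pvGetB (pvMask vA) (cx + d.1) (cy + d.2) = false) := by
        intro h
        rw [pvMask_get] at h
        have := h.2.2.2.2
        simp only [pvF, if_neg hv] at this
        exact Bool.true_eq_false.mp this
      rw [if_pos hgA, if_neg hgB]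
      exact ⟨w, q, vA, rfl, rfl, [], by simp⟩
  · have hgA : (¬(0 ≤ cx + d.1 ∧ cx + d.1 < n ∧ 0 ≤ cy + d.2 ∧ cy + d.2 < m) ∨
        pvGetI vA (cx + d.1) (cy + d.2) ≠ -1) := Or.inl hin
    have hgB : ¬(0 ≤ cx + d.1 ∧ cx + d.1 < n ∧ 0 ≤ cy + d.2 ∧ cy + d.2 < m ∧
        pvGetB (pvMask vA) (cx + d.1) (cy + d.2) = false) := by
      intro h
      exact hin ⟨h.1, h.2.1, h.2.2.1, h.2.2.2.1⟩
    rw [if_pos hgA, if_neg hgB]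
    exact ⟨w, q, vA, rfl, rfl, [], by simp⟩

-- folding over the four directions keeps the two states related
lemma pvFoldAB (n m : Int) (cheese : List (List Int)) (r : Nat) (sAt sAns : Int)
    (hs : sAt ≤ (r : Int)) (cx cy : Int) (ds : List (Int × Int)) :
    ∀ w q vA,
    ∃ w' q' vA',
      (ds.foldl (pvStepA n m cheese r cx cy)
          (pvWmap r w ++ pvWmap (r + 1) q, vA, pvAtOf r q sAt, pvAOf q sAns)
        = (pvWmap r w' ++ pvWmap (r + 1) q', vA', pvAtOf r q' sAt, pvAOf q' sAns))
      ∧ ds.foldl (pvStepB n m cheese cx cy) (w, q, pvMask vA) = (w', q', pvMask vA')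
      ∧ ∃ qd, q' = q ++ qd := by
  induction ds with
  | nil => intro w q vA; exact ⟨w, q, vA, rfl, rfl, [], by simp⟩
  | cons d ds ih =>
    intro w q vA
    obtain ⟨w1, q1, v1, hA1, hB1, d1, hq1⟩ := pvStepAB n m cheese r sAt sAns hs cx cy d w q vA
    obtain ⟨w', q', vA', hA, hB, d2, hq2⟩ := ih w1 q1 v1
    refine ⟨w', q', vA', ?_, ?_, d1 ++ d2, ?_⟩
    · simpa [List.foldl_cons, hA1] using hA
    · simpa [List.foldl_cons, hB1] using hB
    · rw [hq2, hq1, List.append_assoc]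

-- the bisimulation: A's tagged 0-1-BFS loop equals B's round-by-round simulation
-- (all fuel hypotheses say the fuels are sufficient, so neither side ever exhausts one)
lemma pvMainRel (n m : Int) (cheese : List (List Int)) :
    ∀ (M fA ff fB : Nat) (w q : List (Int × Int)) (vA : List (List Int))
      (sAt sAns : Int) (r : Nat),
      sAt ≤ (r : Int) →
      2 * (2 * pvCN vA + w.length + q.length) + (if q = [] then 0 else 1) ≤ M →
      2 * pvCN vA + w.length + q.length + 1 ≤ fA →
      2 * pvCF (pvMask vA) + w.length + 1 ≤ ff →
      pvCF (pvMask vA) + 1 + (if q = [] then 0 else 1) ≤ fB →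
      pvLoopA n m cheese fA (pvWmap r w ++ pvWmap (r + 1) q) vA (pvAtOf r q sAt) (pvAOf q sAns)
        = pvContB n m cheese fB (pvFloodB n m cheese ff w q (pvMask vA)) (r : Int) sAt sAns := by
  intro M
  induction M with
  | zero =>
    intro fA ff fB w q vA sAt sAns r hs hM hfA hff hfB
    have hw : w = [] := by
      cases w with
      | nil => rfl
      | cons _ _ =>
        exfalso
        simp only [List.length_cons] at hM
        split_ifs at hM <;> omega
    subst hw
    have hq : q = [] := by
      cases q with
      | nil => rfl
      | cons _ _ =>
        exfalso
        simp only [List.length_cons] at hM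
        split_ifs at hM <;> omega
    subst hq
    have hfl : pvFloodB n m cheese ff [] [] (pvMask vA) = ([], pvMask vA) := by
      cases ff <;> rfl
    rw [hfl]
    have hA : pvLoopA n m cheese fA (pvWmap r [] ++ pvWmap (r + 1) []) vA
        (pvAtOf r [] sAt) (pvAOf [] sAns) = (sAt, sAns) := by
      cases fA <;> simp [pvWmap, pvAtOf, pvAOf, pvLoopA]
    rw [hA]
    simp [pvContB]
  | succ M ih =>
    intro fA ff fB w q vA sAt sAns r hs hM hfA hff hfB
    cases w with
    | nil =>
      have hfl : pvFloodB n m cheese ff [] q (pvMask vA) = (q, pvMask vA) := by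
        cases ff <;> rfl
      rw [hfl]
      cases q with
      | nil =>
        have hA : pvLoopA n m cheese fA (pvWmap r [] ++ pvWmap (r + 1) []) vA
            (pvAtOf r [] sAt) (pvAOf [] sAns) = (sAt, sAns) := by
          cases fA <;> simp [pvWmap, pvAtOf, pvAOf, pvLoopA]
        rw [hA]
        simp [pvContB]
      | cons x q2 =>
        unfold pvContB
        rw [if_neg (show ¬(x :: q2 : List (Int × Int)) = [] by simp)]
        cases fB with
        | zero => exact absurd hfB (by simp)
        | succ fB' =>
          rw [pvLoopB_succ]
          have e1 : pvWmap r [] ++ pvWmap (r + 1) (x :: q2)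
              = pvWmap (r + 1) (x :: q2) ++ pvWmap (r + 1 + 1) [] := by simp [pvWmap]
          rw [e1]
          have e2 : pvAtOf r (x :: q2) sAt = pvAtOf (r + 1) [] (((r + 1 : Nat)) : Int) := by
            simp [pvAtOf]
          have e3 : pvAOf (x :: q2) sAns = pvAOf [] (((x :: q2).length : Nat) : Int) := by
            simp [pvAOf]
          rw [e2, e3]
          have hm' : 2 * (2 * pvCN vA + (x :: q2).length + ([] : List (Int × Int)).length)
              + (if ([] : List (Int × Int)) = [] then 0 else 1) ≤ M := by
            simp only [List.length_cons, List.length_nil] at hM ⊢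
            rw [if_neg (show ¬(x :: q2 : List (Int × Int)) = [] by simp)] at hM
            simp only [if_true]
            omega
          have hfA' : 2 * pvCN vA + (x :: q2).length + ([] : List (Int × Int)).length + 1
              ≤ fA := by
            simp only [List.length_cons, List.length_nil] at hfA ⊢
            omega
          have hfB' : pvCF (pvMask vA) + 1 + (if ([] : List (Int × Int)) = [] then 0 else 1)
              ≤ fB' := by
            rw [if_neg (show ¬(x :: q2 : List (Int × Int)) = [] by simp)] at hfB
            simp only [if_true]
            omega
          have hrec := ih fA (2 * pvCF (pvMask vA) + (x :: q2).length + 1) fB' (x :: q2) []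
            vA (((r + 1 : Nat)) : Int) (((x :: q2).length : Nat) : Int) (r + 1)
            (le_refl _) hm' hfA' (le_refl _) hfB'
          rw [hrec]
          have hc : ((r + 1 : Nat) : Int) = (r : Int) + 1 := by push_cast; ring
          rw [hc]
    | cons p w2 =>
      obtain ⟨px, py⟩ := p
      simp only [List.length_cons] at hfA hff hM
      cases fA with
      | zero => exact absurd hfA (by omega)
      | succ fA' =>
      cases ff with
      | zero => exact absurd hff (by omega)
      | succ ff' =>
      have e1 : pvWmap r ((px, py) :: w2) ++ pvWmap (r + 1) q
          = (r, px, py) :: (pvWmap r w2 ++ pvWmap (r + 1) q) := by simp [pvWmap]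
      rw [e1]
      obtain ⟨w', q', vA', hA, hB, qd, hqd⟩ := pvFoldAB n m cheese r sAt sAns hs px py pvDirs w2 q vA
      show pvLoopA n m cheese fA'
          (pvDirs.foldl (pvStepA n m cheese r px py)
            (pvWmap r w2 ++ pvWmap (r + 1) q, vA, pvAtOf r q sAt, pvAOf q sAns)).1
          (pvDirs.foldl (pvStepA n m cheese r px py)
            (pvWmap r w2 ++ pvWmap (r + 1) q, vA, pvAtOf r q sAt, pvAOf q sAns)).2.1
          (pvDirs.foldl (pvStepA n m cheese r px py)
            (pvWmap r w2 ++ pvWmap (r + 1) q, vA, pvAtOf r q sAt, pvAOf q sAns)).2.2.1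
          (pvDirs.foldl (pvStepA n m cheese r px py)
            (pvWmap r w2 ++ pvWmap (r + 1) q, vA, pvAtOf r q sAt, pvAOf q sAns)).2.2.2
        = _
      rw [hA]
      dsimp only
      have hfoldA := pvFoldA_le n m cheese r px py pvDirs
        (pvWmap r w2 ++ pvWmap (r + 1) q, vA, pvAtOf r q sAt, pvAOf q sAns)
      rw [hA] at hfoldA
      have hfoldB := pvFoldB_le n m cheese px py pvDirs (w2, q, pvMask vA)
      rw [hB] at hfoldB
      have hlen : (pvWmap r w' ++ pvWmap (r + 1) q').length = w'.length + q'.length := by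
        simp [pvWmap]
      have hlen2 : (pvWmap r w2 ++ pvWmap (r + 1) q).length = w2.length + q.length := by
        simp [pvWmap]
      have hlen3 : q'.length = q.length + qd.length := by rw [hqd]; simp
      have hq'q : q' = [] → q = [] := by
        intro h
        rcases List.append_eq_nil_iff.mp (hqd ▸ h) with ⟨h1, _⟩
        exact h1
      have hm' : 2 * (2 * pvCN vA' + w'.length + q'.length) + (if q' = [] then 0 else 1)
          ≤ M := by
        simp only [hlen, hlen2] at hfoldA
        have hflag : (if q' = [] then 0 else 1) ≤ 1 := by split <;> omega
        have hflag2 : (0 : Nat) ≤ (if q = [] then 0 else 1) := Nat.zero_le _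
        omega
      have hfA' : 2 * pvCN vA' + w'.length + q'.length + 1 ≤ fA' := by
        simp only [hlen, hlen2] at hfoldA
        omega
      have hff' : 2 * pvCF (pvMask vA') + w'.length + 1 ≤ ff' := by
        have h1 := hfoldB.1
        dsimp only at h1
        omega
      have hfB' : pvCF (pvMask vA') + 1 + (if q' = [] then 0 else 1) ≤ fB := by
        have h2 := hfoldB.2
        dsimp only at h2
        rw [hlen3] at h2
        by_cases hq' : q' = []
        · have hq0 : q = [] := hq'q hq'
          rw [if_pos hq']
          rw [if_pos hq0] at hfB
          omega
        · rw [if_neg hq']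
          by_cases hq0 : q = []
          · rw [if_pos hq0] at hfB
            have hqd1 : 1 ≤ qd.length := by
              cases qd with
              | nil => exact absurd (by simpa [hq0] using hqd) hq'
              | cons _ _ => simp
            omega
          · rw [if_neg hq0] at hfB
            omega
      rw [ih fA' ff' fB w' q' vA' sAt sAns r hs hm' hfA' hff' hfB']
      rw [show pvFloodB n m cheese (ff' + 1) ((px, py) :: w2) q (pvMask vA)
          = pvFloodB n m cheese ff'
              (pvDirs.foldl (pvStepB n m cheese px py) (w2, q, pvMask vA)).1
              (pvDirs.foldl (pvStepB n m cheese px py) (w2, q, pvMask vA)).2.1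
              (pvDirs.foldl (pvStepB n m cheese px py) (w2, q, pvMask vA)).2.2
        from rfl]
      rw [hB]

-- ===== VERDICT (by name: the statement is the Claim_ definition above) =====
theorem bfs_spec : Claim_equal_bfs := by
  intro n m cheese _ _
  unfold Spec_bfs bfs bfs_alt
  have hmask : pvMask (pvSet (List.replicate n.toNat (List.replicate m.toNat (-1 : Int))) 0 0 0)
      = pvSet (List.replicate n.toNat (List.replicate m.toNat false)) 0 0 true := by
    rw [pvMask_set _ _ _ _ (show pvF 0 = true by simp [pvF])]
    have : pvMask (List.replicate n.toNat (List.replicate m.toNat (-1 : Int)))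
        = List.replicate n.toNat (List.replicate m.toNat false) := by
      simp [pvMask, List.map_replicate, pvF]
    rw [this]
  dsimp only
  rw [← hmask]
  have hmain := pvMainRel n m cheese
    (2 * (2 * pvCN (pvSet (List.replicate n.toNat (List.replicate m.toNat (-1 : Int))) 0 0 0) + 1 + 0))
    (2 * pvCN (pvSet (List.replicate n.toNat (List.replicate m.toNat (-1 : Int))) 0 0 0) + 2)
    (2 * pvCF (pvMask (pvSet (List.replicate n.toNat (List.replicate m.toNat (-1 : Int))) 0 0 0)) + 0 + 1 + 1)
    (pvCF (pvMask (pvSet (List.replicate n.toNat (List.replicate m.toNat (-1 : Int))) 0 0 0)) + 1)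
    [(0, 0)] []
    (pvSet (List.replicate n.toNat (List.replicate m.toNat (-1 : Int))) 0 0 0)
    0 0 0 (by simp) (by simp) (by simp) (by simp) (by simp)
  simp only [pvWmap, pvAtOf, pvAOf, List.map_cons, List.map_nil, List.append_nil,
    List.length_nil, Nat.cast_zero, if_true] at hmain
  rw [hmain]
  rw [show (pvCF (pvMask (pvSet (List.replicate n.toNat (List.replicate m.toNat (-1 : Int))) 0 0 0)) + 2)
      = (pvCF (pvMask (pvSet (List.replicate n.toNat (List.replicate m.toNat (-1 : Int))) 0 0 0)) + 1) + 1
    from rfl]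
  rw [pvLoopB_succ]
  norm_num
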